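-- pv_equiv track=rewrite | github.com/klusai/tiny-aristotle | generate_logic_expressions.py | generate_logic_expressions
-- ===== SOURCE A (Python) =====
-- def generate_logic_expressions(n):
--     """
--     Generate all valid logic expressions up to n tokens.
--
--     Args:
--         n (int): The maximum number of tokens in the logic expression.
--
--     Returns:
--         set: A set containing all unique valid logic expressions as strings.
--     """
--
--     literals = ["T", "F"]
--     operators = ["AND", "OR"]
--
--     # Recursive function to build valid expressions
--     def build(current, tokens_left, expect_literal, open_parens):
--         if tokens_left == 0:
--             # Add only complete expressions (balanced parentheses, no dangling operators)
--             if open_parens == 0 and not expect_literal: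
--                 valid_expressions.add(" ".join(current))
--             return
--
--         # Add literals if expecting a literal
--         if expect_literal:
--             for literal in literals:
--                 build(current + [literal], tokens_left - 1, False, open_parens)
--
--         # Add operators if expecting an operator
--         if not expect_literal and current and current[-1] not in ("(", "AND", "OR"):
--             for operator in operators:
--                 build(current + [operator], tokens_left - 1, True, open_parens)
--
--         # Add opening parenthesis if expecting a literal
--         if expect_literal:
--             build(current + ["("], tokens_left - 1, True, open_parens + 1)
--
--         # Add closing parenthesis if there are open ones and the last token is not an operator
--         if (
--             open_parens > 0
--             and not expect_literal
--             and current
--             and current[-1] not in ("(", "AND", "OR")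
--         ):
--             build(current + [")"], tokens_left - 1, False, open_parens - 1)
--
--     valid_expressions = set()
--     for length in range(1, n + 1):
--         build([], length, True, 0)  # Start expecting a literal or '('
--
--     return valid_expressions
-- ===== SOURCE B (Python) =====
-- def generate_logic_expressions(n):
--     """Iterative version: one explicit-stack worklist (DFS) replaces the recursive builder."""
--     literals = ("T", "F")
--     operators = ("AND", "OR")
--     valid_expressions = set()
--     # seed the stack with every target length; popping from the end processes length 1 first
--     stack = [((), length, True, 0) for length in range(n, 0, -1)]
--     while stack:
--         current, tokens_left, expect_literal, open_parens = stack.pop()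
--         if tokens_left == 0:
--             if open_parens == 0 and not expect_literal:
--                 valid_expressions.add(" ".join(current))
--             continue
--         children = []
--         if expect_literal:
--             for literal in literals:
--                 children.append((current + (literal,), tokens_left - 1, False, open_parens))
--         if not expect_literal and current and current[-1] not in ("(", "AND", "OR"):
--             for operator in operators:
--                 children.append((current + (operator,), tokens_left - 1, True, open_parens))
--         if expect_literal:
--             children.append((current + ("(",), tokens_left - 1, True, open_parens + 1))
--         if (open_parens > 0 and not expect_literal
--                 and current and current[-1] not in ("(", "AND", "OR")):
--             children.append((current + (")",), tokens_left - 1, False, open_parens - 1))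
--         stack.extend(reversed(children))
--     return valid_expressions
-- ===== Notes on version B (the rewrite author's own statement) =====
-- stated objective: alternative
-- what changed: replaces A's recursive backtracking builder (nested recursion per length) with a single iterative explicit-stack worklist loop seeded with all target lengths at once
import Mathlib
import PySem

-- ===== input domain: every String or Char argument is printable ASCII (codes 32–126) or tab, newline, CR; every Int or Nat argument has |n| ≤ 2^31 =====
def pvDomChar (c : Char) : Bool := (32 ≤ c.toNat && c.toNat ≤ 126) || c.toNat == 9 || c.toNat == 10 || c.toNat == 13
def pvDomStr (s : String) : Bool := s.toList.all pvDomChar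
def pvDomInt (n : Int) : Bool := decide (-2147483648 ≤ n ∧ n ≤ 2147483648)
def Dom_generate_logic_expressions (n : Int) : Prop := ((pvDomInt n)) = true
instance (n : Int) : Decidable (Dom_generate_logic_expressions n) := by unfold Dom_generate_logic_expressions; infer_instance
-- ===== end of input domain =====

-- B replaces A's recursive backtracking builder with a single explicit-stack worklist loop
-- seeded with all target lengths at once (objective: alternative decomposition, same output set).

-- ===== PORT A =====

-- shared helper: Python's `current and current[-1] not in ("(", "AND", "OR")`
def pvLastOk (current : List String) : Bool :=
  match current.getLast? with
  | none => false
  | some s => !(s == "(" || s == "AND" || s == "OR")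

-- the inner recursive `build`; tokens_left is the (nonnegative) fuel
def pvBuild (current : List String) (tokensLeft : Nat) (expectLiteral : Bool)
    (openParens : Int) (acc : PySem.Set String) : PySem.Set String :=
  match tokensLeft with
  | 0 =>
      if openParens == 0 && !expectLiteral then
        PySem.Set.add acc (PySem.Str.join " " current)
      else acc
  | t + 1 =>
      let acc := if expectLiteral then
          ["T", "F"].foldl (fun a lit => pvBuild (current ++ [lit]) t false openParens a) acc
        else acc
      let acc := if !expectLiteral && pvLastOk current then
          ["AND", "OR"].foldl (fun a op => pvBuild (current ++ [op]) t true openParens a) acc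
        else acc
      let acc := if expectLiteral then
          pvBuild (current ++ ["("]) t true (openParens + 1) acc
        else acc
      if decide (0 < openParens) && !expectLiteral && pvLastOk current then
        pvBuild (current ++ [")"]) t false (openParens - 1) acc
      else acc

def generate_logic_expressions (n : Int) : List String :=
  (PySem.List.pyRange 1 (n + 1) 1).foldl
    (fun acc length => pvBuild [] length.toNat true 0 acc) PySem.Set.empty

-- ===== PORT B =====

-- the `children` list built in the loop body (segments in the order Source B appends them)
def pvChildren (current : List String) (t : Nat) (expectLiteral : Bool) (openParens : Int) :
    List (List String × Nat × Bool × Int) :=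
  (if expectLiteral then
      ["T", "F"].map (fun lit => (current ++ [lit], t, false, openParens))
    else []) ++
  (if !expectLiteral && pvLastOk current then
      ["AND", "OR"].map (fun op => (current ++ [op], t, true, openParens))
    else []) ++
  (if expectLiteral then [(current ++ ["("], t, true, openParens + 1)] else []) ++
  (if decide (0 < openParens) && !expectLiteral && pvLastOk current then
      [(current ++ [")"], t, false, openParens - 1)]
    else [])

def pvWeight (fs : List (List String × Nat × Bool × Int)) : Nat :=
  (fs.map (fun f => 6 ^ f.2.1)).sum

theorem pvWeight_children_lt (current : List String) (t : Nat) (e : Bool) (o : Int) :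
    pvWeight (pvChildren current t e o) < 6 ^ (t + 1) := by
  have h1 : 1 ≤ 6 ^ t := Nat.one_le_pow _ _ (by norm_num)
  cases e <;> unfold pvChildren pvWeight <;> split_ifs <;>
    simp_all [pow_succ] <;> omega

-- the `while stack:` loop; the Python stack's TOP (end of the list) is the HEAD here
def pvRunStack : List (List String × Nat × Bool × Int) → PySem.Set String → PySem.Set String
  | [], acc => acc
  | (current, 0, expectLiteral, openParens) :: fs, acc =>
      pvRunStack fs
        (if openParens == 0 && !expectLiteral then
          PySem.Set.add acc (PySem.Str.join " " current)
        else acc)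
  | (current, t + 1, expectLiteral, openParens) :: fs, acc =>
      -- stack.extend(reversed(children)); pop then yields children in order: children ++ fs
      pvRunStack (pvChildren current t expectLiteral openParens ++ fs) acc
termination_by fs _ => pvWeight fs
decreasing_by
  · simp [pvWeight]
  · have := pvWeight_children_lt current t expectLiteral openParens
    simp only [pvWeight, List.map_append, List.sum_append, List.map_cons, List.sum_cons] at *
    omega

-- the seed comprehension runs length = n, n-1, …, 1; reversed because the head is the stack top
def generate_logic_expressions_alt (n : Int) : List String :=
  pvRunStack
    (((PySem.List.pyRange n 0 (-1)).map
        (fun length => (([] : List String), length.toNat, true, (0 : Int)))).reverse)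
    PySem.Set.empty

-- ===== PRECONDITION & SPEC =====
def Spec_generate_logic_expressions (n : Int) (out : List String) : Prop := out = generate_logic_expressions_alt n
instance (n : Int) (out : List String) : Decidable (Spec_generate_logic_expressions n out) := by unfold Spec_generate_logic_expressions; infer_instance

-- ===== CLAIM (what is proved, stated in full; the proofs are below) =====
def Claim_equal_generate_logic_expressions : Prop := ∀ (n : Int), Dom_generate_logic_expressions n → Spec_generate_logic_expressions n (generate_logic_expressions n)

-- ===== LEMMAS AND PROOFS =====

-- every child frame pushed by the loop body carries fuel t
theorem pvChildren_fuel (current : List String) (t : Nat) (e : Bool) (o : Int) :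
    ∀ f ∈ pvChildren current t e o, f.2.1 = t := by
  intro f hf
  cases e <;> cases hpl : pvLastOk current <;> by_cases h2 : (0 : Int) < o <;>
    simp [pvChildren, hpl, h2] at hf <;>
    (rcases hf with rfl | rfl | rfl; all_goals rfl)

-- folding A's build over the children list is exactly one unfolding of build
theorem pvFoldl_children (current : List String) (t : Nat) (e : Bool) (o : Int)
    (acc : PySem.Set String) :
    List.foldl (fun a f => pvBuild f.1 f.2.1 f.2.2.1 f.2.2.2 a) acc (pvChildren current t e o)
      = pvBuild current (t + 1) e o acc := by
  rw [pvBuild]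
  simp only [pvChildren, List.foldl_append]
  cases e <;> cases hpl : pvLastOk current <;> by_cases h2 : (0 : Int) < o <;>
    simp [h2]

-- popping one frame of fuel t computes exactly what A's recursive build does with fuel t
theorem pvRun_cons (t : Nat) :
    ∀ (current : List String) (e : Bool) (o : Int) fs acc,
      pvRunStack ((current, t, e, o) :: fs) acc = pvRunStack fs (pvBuild current t e o acc) := by
  induction t with
  | zero => intros; simp only [pvRunStack, pvBuild]
  | succ t IH =>
    -- processing a block of fuel-t frames folds build over the block
    have hblock : ∀ (cs : List (List String × Nat × Bool × Int)),
        (∀ f ∈ cs, f.2.1 = t) → ∀ fs acc,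
        pvRunStack (cs ++ fs) acc =
          pvRunStack fs (cs.foldl (fun a f => pvBuild f.1 f.2.1 f.2.2.1 f.2.2.2 a) acc) := by
      intro cs
      induction cs with
      | nil => intro _ fs acc; simp
      | cons f cs IHc =>
        intro hf fs acc
        obtain ⟨c, t', e', o'⟩ := f
        have ht : t' = t := hf _ (List.mem_cons_self ..)
        subst ht
        simp only [List.cons_append, List.foldl_cons]
        rw [IH, IHc (fun g hg => hf g (List.mem_cons_of_mem _ hg))]
    intro current e o fs acc
    conv_lhs => rw [pvRunStack]
    rw [hblock _ (pvChildren_fuel current t e o), pvFoldl_children]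

theorem pvSeed_eq (n : Int) :
    ((PySem.List.pyRange n 0 (-1)).map
        (fun length => (([] : List String), length.toNat, true, (0 : Int)))).reverse =
      (PySem.List.pyRange 1 (n + 1) 1).map
        (fun length => (([] : List String), length.toNat, true, (0 : Int))) := by
  rw [PySem.List.pyRange_neg_one_eq_reverse]
  simp

theorem pvRun_seeds (ls : List Int) (acc : PySem.Set String) :
    pvRunStack (ls.map (fun length => (([] : List String), length.toNat, true, (0 : Int)))) acc =
      ls.foldl (fun acc length => pvBuild [] length.toNat true 0 acc) acc := by
  induction ls generalizing acc with
  | nil => simp [pvRunStack]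
  | cons l ls IH => simp only [List.map_cons, List.foldl_cons, pvRun_cons, IH]

-- ===== VERDICT (by name: the statement is the Claim_ definition above) =====
theorem generate_logic_expressions_spec : Claim_equal_generate_logic_expressions := by
  intro n _
  unfold Spec_generate_logic_expressions generate_logic_expressions generate_logic_expressions_alt
  rw [pvSeed_eq, pvRun_seeds]
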